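-- pv_equiv track=rewrite | github.com/BlenderCN/Learnbgame | All_In_One/addons/bdx/utils.py | str_to_valid_java_class_name
-- ===== SOURCE A (Python) =====
-- import string
--
-- def str_to_valid_java_class_name(input_string):
--     class_name = ['i'] # first character must be a letter
--
--     valid_chars = string.ascii_letters + string.digits + '_'
--
--     for char in input_string:
--         if char in valid_chars:
--             class_name.append(char)
--         else:
--             class_name.append('_'+str(ord(char))+'_')
--
--     return "".join(class_name)
-- ===== SOURCE B (Python) =====
-- def str_to_valid_java_class_name(input_string):
--     # Two-pointer run extraction: copy maximal runs of valid characters as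
--     # whole slices, escaping one invalid character between runs.
--     def valid(c):
--         return 'A' <= c <= 'Z' or 'a' <= c <= 'z' or '0' <= c <= '9' or c == '_'
--     pieces = ['i']  # first character must be a letter
--     i, n = 0, len(input_string)
--     while i < n:
--         j = i
--         while j < n and valid(input_string[j]):
--             j += 1
--         pieces.append(input_string[i:j])
--         if j < n:
--             pieces.append('_' + str(ord(input_string[j])) + '_')
--             j += 1
--         i = j
--     return ''.join(pieces)
-- ===== Notes on version B (the rewrite author's own statement) =====
-- stated objective: alternative
-- what changed: A appends character by character after a membership test in a 63-char string; B is a two-pointer scanner that extracts maximal runs of valid characters and copies each run as one slice, escaping the single invalid character between runs.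
import Mathlib
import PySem

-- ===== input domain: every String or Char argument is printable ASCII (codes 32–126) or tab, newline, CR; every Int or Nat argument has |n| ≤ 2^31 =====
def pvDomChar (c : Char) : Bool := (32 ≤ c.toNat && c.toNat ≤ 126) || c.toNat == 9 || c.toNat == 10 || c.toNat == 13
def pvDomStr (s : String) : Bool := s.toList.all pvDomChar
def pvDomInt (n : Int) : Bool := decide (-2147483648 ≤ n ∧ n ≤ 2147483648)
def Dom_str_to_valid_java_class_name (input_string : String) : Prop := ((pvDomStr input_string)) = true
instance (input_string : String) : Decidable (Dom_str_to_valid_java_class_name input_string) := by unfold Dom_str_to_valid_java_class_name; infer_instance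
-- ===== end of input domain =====

-- B replaces A's per-character loop by a two-pointer scanner that copies maximal runs of valid
-- characters as whole slices and escapes the single invalid character between runs; same result.

-- ===== PORT A =====
-- string.ascii_letters + string.digits + '_'
def pvValidChars : List Char :=
  "abcdefghijklmnopqrstuvwxyzABCDEFGHIJKLMNOPQRSTUVWXYZ0123456789_".toList

def str_to_valid_java_class_name (input_string : String) : String :=
  let class_name : List String :=
    input_string.toList.foldl
      (fun acc char =>
        if pvValidChars.contains char then acc ++ [String.ofList [char]]
        else acc ++ [PySem.Str.join "" ["_", PySem.Int.toStr (char.toNat : Int), "_"]])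
      ["i"]
  PySem.Str.join "" class_name

-- ===== PORT B =====
-- Source B's valid(c): 'A' <= c <= 'Z' or 'a' <= c <= 'z' or '0' <= c <= '9' or c == '_'
def pvValidB (c : Char) : Bool :=
  ('A' ≤ c && c ≤ 'Z') || ('a' ≤ c && c ≤ 'z') || ('0' ≤ c && c ≤ '9') || c == '_'

-- Source B's outer while loop: each step takes the maximal valid run (the inner while / slice
-- input_string[i:j]) and, if anything remains, the escape of the one invalid char after it.
def pvPieces : List Char → List (List Char)
  | [] => []
  | c :: rest =>
    match hd : (c :: rest).dropWhile pvValidB with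
    | [] => [(c :: rest).takeWhile pvValidB]
    | d :: tail' =>
        (c :: rest).takeWhile pvValidB ::
          ('_' :: PySem.Int.toChars (d.toNat : Int) ++ ['_']) :: pvPieces tail'
  termination_by l => l.length
  decreasing_by
    have h := List.length_dropWhile_le (p := pvValidB) (l := c :: rest)
    rw [hd] at h
    simp at h ⊢
    omega

def str_to_valid_java_class_name_alt (input_string : String) : String :=
  String.ofList ('i' :: (pvPieces input_string.toList).flatten)

-- ===== PRECONDITION & SPEC =====
def Spec_str_to_valid_java_class_name (input_string : String) (out : String) : Prop := out = str_to_valid_java_class_name_alt input_string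
instance (input_string : String) (out : String) : Decidable (Spec_str_to_valid_java_class_name input_string out) := by unfold Spec_str_to_valid_java_class_name; infer_instance

-- ===== CLAIM (what is proved, stated in full; the proofs are below) =====
def Claim_equal_str_to_valid_java_class_name : Prop := ∀ (input_string : String), Dom_str_to_valid_java_class_name input_string → Spec_str_to_valid_java_class_name input_string (str_to_valid_java_class_name input_string)

-- ===== LEMMAS AND PROOFS =====

-- the per-character contribution both programs produce, as a char list
def pvStepC (c : Char) : List Char :=
  if pvValidB c then [c] else '_' :: PySem.Int.toChars (c.toNat : Int) ++ ['_']

-- A's per-char contribution, as a string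
def pvStep (c : Char) : String :=
  if pvValidChars.contains c then String.ofList [c]
  else PySem.Str.join "" ["_", PySem.Int.toStr (c.toNat : Int), "_"]

theorem pvChar_eq_iff (c d : Char) : c = d ↔ c.toNat = d.toNat :=
  ⟨fun h => h ▸ rfl, fun h => Char.ext (UInt32.toNat_inj.mp h)⟩

theorem pvValidB_iff (c : Char) :
    pvValidB c = true ↔
      ((65 ≤ c.toNat ∧ c.toNat ≤ 90) ∨ (97 ≤ c.toNat ∧ c.toNat ≤ 122) ∨
       (48 ≤ c.toNat ∧ c.toNat ≤ 57) ∨ c.toNat = 95) := by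
  simp [pvValidB, Char.le_def, UInt32.le_iff_toNat_le, pvChar_eq_iff]
  tauto

theorem pvContains_iff (c : Char) :
    pvValidChars.contains c = true ↔
      ((65 ≤ c.toNat ∧ c.toNat ≤ 90) ∨ (97 ≤ c.toNat ∧ c.toNat ≤ 122) ∨
       (48 ≤ c.toNat ∧ c.toNat ≤ 57) ∨ c.toNat = 95) := by
  have h : pvValidChars.contains c = true ↔ c.toNat ∈ pvValidChars.map Char.toNat := by
    simp only [List.contains_iff_mem, List.mem_map]
    constructor
    · intro hm; exact ⟨c, hm, rfl⟩
    · rintro ⟨d, hd, hdn⟩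
      have : d = c := (pvChar_eq_iff d c).mpr hdn
      simpa [this] using hd
  rw [h]
  rw [show pvValidChars.map Char.toNat =
      [97,98,99,100,101,102,103,104,105,106,107,108,109,110,111,112,113,114,115,116,117,118,
       119,120,121,122,65,66,67,68,69,70,71,72,73,74,75,76,77,78,79,80,81,82,83,84,85,86,87,
       88,89,90,48,49,50,51,52,53,54,55,56,57,95] from by decide]
  simp only [List.mem_cons, List.not_mem_nil, or_false]
  omega

theorem pvContains_eq_validB (c : Char) : pvValidChars.contains c = pvValidB c := by
  by_cases h : (65 ≤ c.toNat ∧ c.toNat ≤ 90) ∨ (97 ≤ c.toNat ∧ c.toNat ≤ 122) ∨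
      (48 ≤ c.toNat ∧ c.toNat ≤ 57) ∨ c.toNat = 95
  · rw [(pvContains_iff c).mpr h, (pvValidB_iff c).mpr h]
  · rw [Bool.eq_false_iff.mpr (fun hc => h ((pvContains_iff c).mp hc)),
        Bool.eq_false_iff.mpr (fun hb => h ((pvValidB_iff c).mp hb))]

theorem pvJoin_nil (parts : List (List Char)) : PySem.Chars.join [] parts = parts.flatten := by
  induction parts with
  | nil => rfl
  | cons p t ih =>
    cases t with
    | nil => simp [PySem.Chars.join, List.intercalate]
    | cons q r => simp [PySem.Chars.join_cons_cons] at *; simp [ih]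

theorem pvStep_toList (c : Char) : (pvStep c).toList = pvStepC c := by
  unfold pvStep pvStepC
  rw [pvContains_eq_validB]
  by_cases h : pvValidB c = true
  · rw [if_pos h, if_pos h]; simp
  · rw [if_neg h, if_neg h]
    rw [show (PySem.Str.join "" ["_", PySem.Int.toStr (c.toNat : Int), "_"]).toList =
        PySem.Chars.join [] [['_'], PySem.Int.toChars (c.toNat : Int), ['_']] from by
          simp [PySem.Str.toList_join, PySem.Int.toList_toStr]]
    rw [pvJoin_nil]
    simp

theorem pvFoldl_steps (l : List Char) (acc : List String) :
    l.foldl (fun a c => a ++ [pvStep c]) acc = acc ++ l.map pvStep := by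
  induction l generalizing acc with
  | nil => simp
  | cons c t ih => simp [List.foldl_cons, ih, List.append_assoc]

-- A's result characterised as a per-character flatMap
theorem pvA_eq (s : String) :
    str_to_valid_java_class_name s = String.ofList ('i' :: s.toList.flatMap pvStepC) := by
  unfold str_to_valid_java_class_name
  have hfold : s.toList.foldl
      (fun acc char =>
        if pvValidChars.contains char then acc ++ [String.ofList [char]]
        else acc ++ [PySem.Str.join "" ["_", PySem.Int.toStr (char.toNat : Int), "_"]])
      ["i"] = ["i"] ++ s.toList.map pvStep := by
    rw [← pvFoldl_steps]
    apply PySem.List.foldl_congr_mem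
    intro acc c _
    unfold pvStep
    split <;> rfl
  simp only [hfold]
  apply String.ext
  rw [show (PySem.Str.join "" (["i"] ++ s.toList.map pvStep)).toList =
      PySem.Chars.join [] ((["i"] ++ s.toList.map pvStep).map String.toList) from by
        simp [PySem.Str.toList_join]]
  rw [pvJoin_nil]
  simp [Function.comp_def, pvStep_toList, List.flatMap_def]

theorem pvFlatMap_valid (l : List Char) (h : ∀ c ∈ l, pvValidB c = true) :
    l.flatMap pvStepC = l := by
  induction l with
  | nil => rfl
  | cons c t ih =>
    simp only [List.flatMap_cons]
    rw [pvStepC, if_pos (h c (List.mem_cons_self ..)),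
        ih (fun d hd => h d (List.mem_cons_of_mem _ hd))]
    rfl

-- head of a nonempty dropWhile fails the predicate
theorem pvDropWhile_head_false (p : Char → Bool) (l : List Char) (d : Char) (t : List Char)
    (h : l.dropWhile p = d :: t) : p d = false := by
  induction l with
  | nil => simp at h
  | cons c rest ih =>
    by_cases hc : p c = true
    · exact ih (by simpa [List.dropWhile_cons, hc] using h)
    · have hcl : c = d := by
        have : c :: rest = d :: t := by
          simpa [List.dropWhile_cons, Bool.eq_false_iff.mpr hc] using h
        exact (List.cons.injEq .. ▸ this : _ ∧ _).1
      rw [← hcl]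
      exact Bool.eq_false_iff.mpr hc

-- B's run decomposition flattens to the same per-character flatMap
theorem pvPieces_flatten (l : List Char) : (pvPieces l).flatten = l.flatMap pvStepC := by
  induction l using pvPieces.induct with
  | case1 => simp [pvPieces]
  | case2 c rest hd =>
    rw [pvPieces, hd]
    have hsplit := List.takeWhile_append_dropWhile (p := pvValidB) (l := c :: rest)
    rw [hd, List.append_nil] at hsplit
    have hval : ∀ d ∈ (c :: rest), pvValidB d = true := by
      intro d hdm
      exact List.mem_takeWhile_imp (hsplit ▸ hdm)
    rw [pvFlatMap_valid _ hval]
    simp [hsplit]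
  | case3 c rest d tail' hd ih =>
    rw [pvPieces, hd]
    have hsplit := List.takeWhile_append_dropWhile (p := pvValidB) (l := c :: rest)
    rw [hd] at hsplit
    have hval : ∀ e ∈ (c :: rest).takeWhile pvValidB, pvValidB e = true :=
      fun e hem => List.mem_takeWhile_imp hem
    have hdinv : pvValidB d = false := pvDropWhile_head_false pvValidB (c :: rest) d tail' hd
    conv_rhs => rw [← hsplit]
    simp only [List.flatMap_append, List.flatMap_cons, List.flatten_cons]
    rw [ih, pvFlatMap_valid _ hval, pvStepC, if_neg (by simp [hdinv])]

theorem str_to_valid_java_class_name_eq (s : String) :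
    str_to_valid_java_class_name s = str_to_valid_java_class_name_alt s := by
  rw [pvA_eq]
  unfold str_to_valid_java_class_name_alt
  rw [pvPieces_flatten]

-- ===== VERDICT (by name: the statement is the Claim_ definition above) =====
theorem str_to_valid_java_class_name_spec : Claim_equal_str_to_valid_java_class_name := by
  intro s _
  unfold Spec_str_to_valid_java_class_name
  exact str_to_valid_java_class_name_eq s
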